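-- pv_equiv track=rewrite | github.com/Mufasaxi/snAIke | Optimised/dijkstra.py | numberCells
-- ===== SOURCE A (Python) =====
-- def makeGrid(rows , cols):
--     return [[0 for col in range(cols)] for row in range(rows)]
--
-- def numberCells(grid):
--     total = len(grid) * len(grid[0])
--     count = 0
--     outputGrid = makeGrid(len(grid), len(grid[0]))
--     while count < total:
--         for row in range(len(grid)):
--             for col in range(len(grid[0])):
--                 outputGrid[row][col] = count
--                 count += 1
--     return outputGrid
-- ===== SOURCE B (Python) =====
-- def numberCells(grid):
--     rows = len(grid)
--     cols = len(grid[0])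
--     return [[row * cols + col for col in range(cols)] for row in range(rows)]
-- ===== Notes on version B (the rewrite author's own statement) =====
-- stated objective: simpler
-- what changed: Replaces the while-loop with a threaded running counter over a pre-allocated zero grid by a closed-form comprehension computing each cell as row*cols+col directly from its coordinates.
import Mathlib
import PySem

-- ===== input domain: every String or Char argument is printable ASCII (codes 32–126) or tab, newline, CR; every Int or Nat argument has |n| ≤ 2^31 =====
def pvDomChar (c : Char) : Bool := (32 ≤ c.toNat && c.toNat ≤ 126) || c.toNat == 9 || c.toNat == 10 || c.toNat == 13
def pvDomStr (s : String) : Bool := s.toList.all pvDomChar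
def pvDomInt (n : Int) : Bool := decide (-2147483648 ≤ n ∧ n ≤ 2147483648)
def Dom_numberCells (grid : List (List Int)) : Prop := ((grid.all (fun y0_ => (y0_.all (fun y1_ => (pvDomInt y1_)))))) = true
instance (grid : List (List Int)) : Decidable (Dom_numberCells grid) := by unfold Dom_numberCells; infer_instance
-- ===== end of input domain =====

-- B replaces A's while-loop and threaded counter by a closed-form comprehension row*cols+col.

-- ===== PORT A =====
-- helper makeGrid(rows, cols)
def makeGrid (rows cols : Nat) : List (List Int) :=
  (List.range rows).map (fun _ => (List.range cols).map (fun _ => (0 : Int)))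

-- outputGrid[row][col] = count; count += 1.  row/col come from range() so they are
-- nonnegative and in range of outputGrid; List.set / getD are exact there.
def pvInnerStep (row : Nat) (p : List (List Int) × Nat) (col : Nat) : List (List Int) × Nat :=
  (p.1.set row ((p.1.getD row []).set col ((p.2 : Int))), p.2 + 1)

-- for col in range(len(grid[0])): …
def pvOuterStep (cols : Nat) (p : List (List Int) × Nat) (row : Nat) : List (List Int) × Nat :=
  (List.range cols).foldl (pvInnerStep row) p

-- one full body of the while loop: for row in range(rows): for col in range(cols): …
def pvPass (rows cols : Nat) (p : List (List Int) × Nat) : List (List Int) × Nat :=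
  (List.range rows).foldl (pvOuterStep cols) p

theorem pvInner_snd (row : Nat) : ∀ (l : List Nat) (p : List (List Int) × Nat),
    ((l.foldl (pvInnerStep row) p).2 = p.2 + l.length) := by
  intro l
  induction l with
  | nil => intro p; simp
  | cons a t ih => intro p; simp [List.foldl, ih, pvInnerStep]; omega

theorem pvPass_snd (rows cols : Nat) (p : List (List Int) × Nat) :
    (pvPass rows cols p).2 = p.2 + rows * cols := by
  unfold pvPass
  induction rows generalizing p with
  | zero => simp
  | succ n ih =>
      rw [List.range_succ, List.foldl_append]
      simp only [List.foldl_cons, List.foldl_nil, pvOuterStep, pvInner_snd, ih]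
      simp [List.length_range, Nat.succ_mul]
      omega

-- while count < total: …   (count strictly increases by total > 0 each pass)
def pvLoop (rows cols total : Nat) (p : List (List Int) × Nat) : List (List Int) :=
  if h : p.2 < total ∧ total = rows * cols then  -- h: while count < total (the pass invariant for termination)
    pvLoop rows cols total (pvPass rows cols p)
  else p.1
termination_by total - p.2
decreasing_by
  rw [pvPass_snd]; omega

def numberCells (grid : List (List Int)) : List (List Int) :=
  -- grid[0]: Pre_ excludes the empty grid, on which Python raises IndexError
  let rows := grid.length
  let cols := ((PySem.List.pyGet? grid 0).getD []).length
  let total := rows * cols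
  pvLoop rows cols total (makeGrid rows cols, 0)

-- ===== PORT B =====
def numberCells_alt (grid : List (List Int)) : List (List Int) :=
  let rows := grid.length
  let cols := ((PySem.List.pyGet? grid 0).getD []).length  -- grid[0]: raises on empty grid, excluded by Pre_
  (List.range rows).map (fun row => (List.range cols).map (fun col => ((row * cols + col : Nat) : Int)))

-- ===== PRECONDITION & SPEC =====
-- Pre_ excludes only the empty grid, on which both Pythons raise IndexError at grid[0].
def Pre_numberCells (grid : List (List Int)) : Prop := grid ≠ []
instance (grid : List (List Int)) : Decidable (Pre_numberCells grid) := by unfold Pre_numberCells; infer_instance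
def pvWitness_numberCells : List (List Int) := [[1, 2], [3, 4]]

def Spec_numberCells (grid : List (List Int)) (out : List (List Int)) : Prop := out = numberCells_alt grid
instance (grid : List (List Int)) (out : List (List Int)) : Decidable (Spec_numberCells grid out) := by unfold Spec_numberCells; infer_instance

-- ===== CLAIM (what is proved, stated in full; the proofs are below) =====
def Claim_equal_numberCells : Prop := ∀ (grid : List (List Int)), Dom_numberCells grid → Pre_numberCells grid → Spec_numberCells grid (numberCells grid)

-- ===== LEMMAS AND PROOFS =====

-- filling one row position by position: positions < n hold c + i, the rest are untouched
def pvSetSeq (l : List Int) (c : Nat) : Nat → List Int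
  | 0 => l
  | n + 1 => (pvSetSeq l c n).set n ((c + n : Nat))

theorem pvSetSeq_length (l : List Int) (c n : Nat) : (pvSetSeq l c n).length = l.length := by
  induction n with
  | zero => rfl
  | succ k ih => simp [pvSetSeq, ih]

theorem pvSetSeq_getElem (l : List Int) (c n : Nat) (i : Nat) (hi : i < l.length) :
    (pvSetSeq l c n)[i]'(by rw [pvSetSeq_length]; exact hi)
      = if i < n then ((c + i : Nat) : Int) else l[i] := by
  induction n with
  | zero => simp [pvSetSeq]
  | succ k ih =>
      simp only [pvSetSeq]
      rw [List.getElem_set]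
      by_cases h : k = i
      · subst h; simp
      · rw [if_neg h, ih]
        by_cases h2 : i < k
        · rw [if_pos h2, if_pos (by omega)]
        · rw [if_neg h2, if_neg (by omega)]

theorem pvSetSeq_full (l : List Int) (c : Nat) :
    pvSetSeq l c l.length = (List.range l.length).map (fun j => ((c + j : Nat) : Int)) := by
  apply List.ext_getElem
  · simp [pvSetSeq_length]
  · intro i h1 h2
    rw [pvSetSeq_getElem l c l.length i (by simpa [pvSetSeq_length] using h1)]
    simp at h2 ⊢
    omega

theorem pvInner_fold (row : Nat) (og : List (List Int)) (c : Nat) (hrow : row < og.length) :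
    ∀ (n : Nat), (List.range n).foldl (pvInnerStep row) (og, c)
      = (og.set row (pvSetSeq (og.getD row []) c n), c + n) := by
  intro n
  induction n with
  | zero =>
      simp only [List.range_zero, List.foldl_nil, pvSetSeq]
      rw [List.getD_eq_getElem _ _ hrow, List.set_getElem_self]
      simp
  | succ k ih =>
      rw [List.range_succ, List.foldl_append, ih]
      simp only [List.foldl_cons, List.foldl_nil, pvInnerStep, List.set_set]
      rw [List.getD_eq_getElem _ _ (by simpa using hrow), List.getElem_set_self]
      simp only [pvSetSeq, Prod.mk.injEq]
      exact ⟨trivial, by omega⟩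

-- the outer loop fills the first r rows of the zero grid with the closed-form values
theorem pvOuter_fold (rows cols : Nat) :
    ∀ (r : Nat), r ≤ rows →
      (List.range r).foldl (pvOuterStep cols) (makeGrid rows cols, 0)
        = ((List.range rows).map (fun i =>
            if i < r then (List.range cols).map (fun j => ((i * cols + j : Nat) : Int))
            else (List.range cols).map (fun _ => (0 : Int))), r * cols) := by
  intro r
  induction r with
  | zero =>
      intro _
      simp [makeGrid]
  | succ k ih =>
      intro hk
      rw [List.range_succ, List.foldl_append, ih (by omega)]
      simp only [List.foldl_cons, List.foldl_nil, pvOuterStep]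
      have hlen : k < ((List.range rows).map (fun i =>
          if i < k then (List.range cols).map (fun j => ((i * cols + j : Nat) : Int))
          else (List.range cols).map (fun _ => (0 : Int)))).length := by
        simpa using (by omega : k < rows)
      rw [pvInner_fold k _ _ hlen cols]
      have hget : (((List.range rows).map (fun i =>
          if i < k then (List.range cols).map (fun j => ((i * cols + j : Nat) : Int))
          else (List.range cols).map (fun _ => (0 : Int)))).getD k [])
          = (List.range cols).map (fun _ => (0 : Int)) := by
        rw [List.getD_eq_getElem _ _ hlen]
        simp
      rw [hget]
      have hfull : pvSetSeq ((List.range cols).map (fun _ => (0 : Int))) (k * cols) cols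
          = (List.range cols).map (fun j => ((k * cols + j : Nat) : Int)) := by
        have := pvSetSeq_full ((List.range cols).map (fun _ => (0 : Int))) (k * cols)
        simpa using this
      rw [hfull]
      simp only [Prod.mk.injEq]
      refine ⟨?_, ?_⟩
      · apply List.ext_getElem
        · simp
        · intro i h1 h2
          simp only [List.getElem_set, List.getElem_map, List.getElem_range]
          by_cases h : k = i
          · subst h; simp
          · simp only [if_neg h]
            by_cases h2' : i < k
            · rw [if_pos h2', if_pos (by omega)]
            · rw [if_neg h2', if_neg (by omega)]
      · simp [Nat.succ_mul]

-- unrolling the while loop: it runs exactly one pass when total > 0, none when total = 0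
theorem pvLoop_eval (rows cols : Nat) :
    pvLoop rows cols (rows * cols) (makeGrid rows cols, 0)
      = (List.range rows).map (fun i =>
          if i < rows then (List.range cols).map (fun j => ((i * cols + j : Nat) : Int))
          else (List.range cols).map (fun _ => (0 : Int))) := by
  by_cases h : 0 < rows * cols
  · rw [pvLoop, dif_pos ⟨h, rfl⟩]
    have hpass : pvPass rows cols (makeGrid rows cols, 0)
        = ((List.range rows).map (fun i =>
            if i < rows then (List.range cols).map (fun j => ((i * cols + j : Nat) : Int))
            else (List.range cols).map (fun _ => (0 : Int))), rows * cols) := by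
      have := pvOuter_fold rows cols rows (le_refl rows)
      simpa [pvPass] using this
    rw [hpass, pvLoop, dif_neg (by simp)]
  · rw [pvLoop, dif_neg (by omega)]
    have hc : cols = 0 ∨ rows = 0 := by
      rcases Nat.eq_zero_of_not_pos h |> Nat.mul_eq_zero.mp with h1 | h1
      · right; exact h1
      · left; exact h1
    rcases hc with hc | hc <;> simp [makeGrid, hc]

theorem numberCells_main (grid : List (List Int)) :
    numberCells grid = numberCells_alt grid := by
  unfold numberCells numberCells_alt
  rw [pvLoop_eval]
  apply List.map_congr_left
  intro i hi
  simp only [List.mem_range] at hi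
  rw [if_pos hi]

-- ===== VERDICT (by name: the statement is the Claim_ definition above) =====
theorem numberCells_spec : Claim_equal_numberCells := by
  intro grid _ _
  unfold Spec_numberCells
  exact numberCells_main grid
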